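-- pv_equiv track=rewrite | github.com/CyberSportsmen/Tema_1_LFA | main.py | citesteTransitions
-- ===== SOURCE A (Python) =====
-- def citesteTransitions(lines):
--     transitions = {}
--     for line in lines:
--         line = line.strip()
--         if line.startswith('#'):
--             continue
--         if line == "End":
--             break
--         if line != "Transitions:":
--             left, middle, right = line.split(",")
--             left = left.strip()
--             middle = middle.strip()
--             right = right.strip()
--             # TODO: CHECK NFA si sa apartina states si sigma
--             if transitions.get(left, None) == None:
--                 transitions[left] = [(middle, right)]
--             else:
--                 transitions[left].append((middle, right))
--     return transitions
-- ===== SOURCE B (Python) =====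
-- def citesteTransitions(lines):
--     # Phase 1: flatten the relevant lines into an ordered list of (key, (symbol, target)) records.
--     records = []
--     for raw in lines:
--         s = raw.strip()
--         if s.startswith('#'):
--             continue
--         if s == "End":
--             break
--         if s == "Transitions:":
--             continue
--         left, middle, right = s.split(",")
--         records.append((left.strip(), (middle.strip(), right.strip())))
--     # Phase 2: group the flat records by key, keys in first-occurrence order,
--     # collecting each group with a per-key scan over the records (no incremental dict).
--     keys = []
--     for k, _ in records:
--         if k not in keys:
--             keys.append(k)
--     return {k: [p for kk, p in records if kk == k] for k in keys}
-- ===== Notes on version B (the rewrite author's own statement) =====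
-- stated objective: alternative
-- what changed: A builds the dict incrementally inside its parsing loop (get + insert-or-append per line); B first flattens the input into an ordered list of (key, pair) records, then groups afterwards: a first-occurrence key list plus one filtering scan over the records per key, with no dict maintained during parsing.
import Mathlib
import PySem

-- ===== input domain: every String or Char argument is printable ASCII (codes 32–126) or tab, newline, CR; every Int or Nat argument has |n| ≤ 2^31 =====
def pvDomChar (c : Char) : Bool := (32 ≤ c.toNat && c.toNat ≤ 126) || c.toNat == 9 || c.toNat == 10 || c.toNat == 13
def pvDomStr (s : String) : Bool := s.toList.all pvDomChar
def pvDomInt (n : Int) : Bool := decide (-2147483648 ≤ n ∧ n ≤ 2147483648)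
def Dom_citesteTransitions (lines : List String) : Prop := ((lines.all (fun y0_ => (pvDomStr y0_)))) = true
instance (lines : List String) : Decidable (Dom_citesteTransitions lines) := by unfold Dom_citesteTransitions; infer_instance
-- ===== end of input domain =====

-- B replaces A's incremental dict-building parse loop by a two-phase reading: flatten to an
-- ordered record list, then group by first-occurrence keys with a per-key scan (objective: alternative).


-- ===== PORT A =====
-- 'left, middle, right = line.split(",")' + A's get/insert-or-append branch; a split that is not
-- exactly 3 parts is a Python ValueError (excluded by Pre_), the port leaves the dict unchanged there.
def pvUpdA (d : PySem.Dict String (List (String × String))) (s : String) :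
    PySem.Dict String (List (String × String)) :=
  match PySem.Str.split? s "," with
  | some [l, m, r] =>
      let left := PySem.Str.strip l
      let middle := PySem.Str.strip m
      let right := PySem.Str.strip r
      if d.get? left = none then d.insert left [(middle, right)]
      else d.modify left [] (· ++ [(middle, right)])
  | _ => d

def pvLoopA (lines : List String) (d : PySem.Dict String (List (String × String))) :
    PySem.Dict String (List (String × String)) :=
  match lines with
  | [] => d
  | line :: rest =>
    let s := PySem.Str.strip line
    if PySem.Str.startswith s "#" then pvLoopA rest d
    else if s = "End" then d
    else if s ≠ "Transitions:" then pvLoopA rest (pvUpdA d s)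
    else pvLoopA rest d

def citesteTransitions (lines : List String) : List (String × List (String × String)) :=
  (pvLoopA lines PySem.Dict.empty).items

-- ===== PORT B =====
-- Phase 1 of Source B: flatten into (key, (symbol, target)) records; a split that is not exactly
-- 3 parts is a Python ValueError (excluded by Pre_), the port skips such a line.
def pvParseB (lines : List String) : List (String × (String × String)) :=
  match lines with
  | [] => []
  | raw :: rest =>
    let s := PySem.Str.strip raw
    if PySem.Str.startswith s "#" then pvParseB rest
    else if s = "End" then []
    else if s = "Transitions:" then pvParseB rest
    else
      match PySem.Str.split? s "," with
      | some [l, m, r] =>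
          (PySem.Str.strip l, (PySem.Str.strip m, PySem.Str.strip r)) :: pvParseB rest
      | _ => pvParseB rest

-- Phase 2 of Source B: the 'k not in keys'/append loop is exactly PySem.Set.ofList on the key column;
-- then one filtering scan over the records per key.
def citesteTransitions_alt (lines : List String) : List (String × List (String × String)) :=
  let records := pvParseB lines
  (PySem.Set.ofList (records.map Prod.fst)).map
    (fun k => (k, (records.filter (fun t => t.1 == k)).map Prod.snd))

-- ===== PRECONDITION & SPEC =====
-- Pre_ excludes exactly the inputs where Python A raises ValueError: a stripped line before the
-- first "End" that is neither a '#'-comment nor the "Transitions:" header but does not split on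
-- ',' into exactly 3 parts.
def Pre_citesteTransitions (lines : List String) : Prop :=
  ∀ s ∈ (lines.map PySem.Str.strip).takeWhile (fun s => s != "End"),
    PySem.Str.startswith s "#" = true ∨ s = "Transitions:" ∨
      (PySem.Str.split? s ",").map List.length = some 3
instance (lines : List String) : Decidable (Pre_citesteTransitions lines) := by
  unfold Pre_citesteTransitions; infer_instance

def pvWitness_citesteTransitions : List String :=
  ["Transitions:", " q0 , a , q1 ", "# comment", "q0,b,q2", "End", "junk"]

def Spec_citesteTransitions (lines : List String) (out : List (String × List (String × String))) : Prop := out = citesteTransitions_alt lines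
instance (lines : List String) (out : List (String × List (String × String))) : Decidable (Spec_citesteTransitions lines out) := by unfold Spec_citesteTransitions; infer_instance

-- ===== CLAIM (what is proved, stated in full; the proofs are below) =====
def Claim_equal_citesteTransitions : Prop := ∀ (lines : List String), Dom_citesteTransitions lines → Pre_citesteTransitions lines → Spec_citesteTransitions lines (citesteTransitions lines)

-- ===== LEMMAS AND PROOFS =====

-- The grouping step of one record: A's insert-or-append branch equals the modify-append step.
lemma pvUpdA_eq_modify (d : PySem.Dict String (List (String × String)))
    (s : String) :
    pvUpdA d s =
      match PySem.Str.split? s "," with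
      | some [l, m, r] =>
          d.modify (PySem.Str.strip l) []
            (· ++ [(PySem.Str.strip m, PySem.Str.strip r)])
      | _ => d := by
  unfold pvUpdA
  cases h : PySem.Str.split? s "," with
  | none => rfl
  | some parts =>
    match parts with
    | [] => rfl
    | [_] => rfl
    | [_, _] => rfl
    | [l, m, r] =>
      simp only
      by_cases hg : d.get? (PySem.Str.strip l) = none
      · rw [if_pos hg]
        simp [PySem.Dict.modify, PySem.Dict.getD_eq_get?_getD, hg]
      · rw [if_neg hg]
    | _ :: _ :: _ :: _ :: _ => rfl

-- A's loop equals the modify-append fold over B's flat record list, from any dict.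
lemma pvLoopA_eq_fold (lines : List String) (d : PySem.Dict String (List (String × String))) :
    pvLoopA lines d =
      (pvParseB lines).foldl (fun d t => d.modify t.1 [] (· ++ [t.2])) d := by
  induction lines generalizing d with
  | nil => rfl
  | cons raw rest ih =>
    simp only [pvLoopA, pvParseB]
    by_cases h1 : PySem.Chars.startswith (PySem.Chars.strip raw.toList) ['#'] = true
    · simp [h1, ih]
    · by_cases h2 : PySem.Str.strip raw = "End"
      · have hs : PySem.Chars.startswith ['E','n','d'] ['#'] = false := by decide
        simp [h2, hs]
      · by_cases h3 : PySem.Str.strip raw = "Transitions:"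
        · simp [h3, ih]
        · cases h : PySem.Str.split? (PySem.Str.strip raw) "," with
          | none => simp [h1, h2, h3, h, ih, pvUpdA_eq_modify]
          | some parts =>
            match parts with
            | [] => simp [h1, h2, h3, h, ih, pvUpdA_eq_modify]
            | [_] => simp [h1, h2, h3, h, ih, pvUpdA_eq_modify]
            | [_, _] => simp [h1, h2, h3, h, ih, pvUpdA_eq_modify]
            | [l, m, r] => simp [h1, h2, h3, h, ih, pvUpdA_eq_modify]
            | _ :: _ :: _ :: _ :: _ => simp [h1, h2, h3, h, ih, pvUpdA_eq_modify]

-- ===== VERDICT (by name: the statement is the Claim_ definition above) =====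
theorem citesteTransitions_spec : Claim_equal_citesteTransitions := by
  intro lines _ _
  unfold Spec_citesteTransitions citesteTransitions citesteTransitions_alt
  rw [pvLoopA_eq_fold]
  rw [PySem.Dict.items_eq_map_keys _
    (PySem.Dict.nodup_keys_foldl_modify_key _ _ _ _ _ PySem.Dict.nodup_keys_empty)
    ([] : List (String × String))]
  simp [PySem.Dict.keys_foldl_modify_key, PySem.Dict.getD_foldl_modify_append,
        PySem.Set.update, PySem.Set.ofList]
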